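-- pv_equiv track=rewrite | github.com/jiexunshen/2025-UCAS-Web-PasswordAnalysis | analysis_1_composition.py | analyze_pattern_structure
-- ===== SOURCE A (Python) =====
-- from collections import Counter, defaultdict
--
-- def get_char_type(char):
--     if char.islower(): return 'L'
--     if char.isupper(): return 'U'
--     if char.isdigit(): return 'D'
--     if not char.isalnum(): return 'S'
--     return 'O'
--
-- def extract_structure_pattern(password):
--     password = password.strip()
--     if not password: return None
--     pattern_parts = []
--     current_char_type = get_char_type(password[0])
--     count = 1
--     for i in range(1, len(password)):
--         next_char_type = get_char_type(password[i])
--         if next_char_type == current_char_type: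
--             count += 1
--         else:
--             pattern_parts.append(f"{current_char_type}{count}")
--             current_char_type = next_char_type
--             count = 1
--     pattern_parts.append(f"{current_char_type}{count}")
--     return "".join(pattern_parts)
--
-- def analyze_pattern_structure(passwords):
--     """
--     统计密码中最常见的结构模式，并记录每个模式下所有实际口令的频率。
--     返回:
--         - pattern_counter: 结构模式的频率计数
--         - password_by_pattern: defaultdict(Counter)，存储每个模式下的口令频率
--     """
--     pattern_counter = Counter()
--     password_by_pattern = defaultdict(Counter)
--
--     for pwd in passwords:
--         pwd_stripped = pwd.strip()
--         if not pwd_stripped: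
--             continue
--
--         pattern = extract_structure_pattern(pwd_stripped)
--         if pattern:
--             pattern_counter[pattern] += 1
--             # 记录该模式下，这个口令出现的次数
--             password_by_pattern[pattern][pwd_stripped] += 1
--
--     return pattern_counter, password_by_pattern
-- ===== SOURCE B (Python) =====
-- # B: extract the structure pattern by two-pointer run splitting instead of A's
-- # current-type/count state machine; aggregation kept as one pass over passwords.
-- from collections import Counter, defaultdict
--
-- def get_char_type(char):
--     if char.islower(): return 'L'
--     if char.isupper(): return 'U'
--     if char.isdigit(): return 'D'
--     if not char.isalnum(): return 'S'
--     return 'O'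
--
-- def _runs(s):
--     i, n = 0, len(s)
--     while i < n:
--         t = get_char_type(s[i])
--         j = i
--         while j < n and get_char_type(s[j]) == t:
--             j += 1
--         yield t, j - i
--         i = j
--
-- def analyze_pattern_structure(passwords):
--     pattern_counter = Counter()
--     password_by_pattern = defaultdict(Counter)
--     for pwd in passwords:
--         p = pwd.strip()
--         if not p:
--             continue
--         pattern = "".join(f"{t}{c}" for t, c in _runs(p))
--         pattern_counter[pattern] += 1
--         password_by_pattern[pattern][p] += 1
--     return pattern_counter, password_by_pattern
-- ===== Notes on version B (the rewrite author's own statement) =====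
-- stated objective: alternative
-- what changed: extract_structure_pattern's current-type/count state machine with an accumulated parts list is replaced by a two-pointer run splitter that yields maximal same-type runs directly; the per-password aggregation stays one pass.
import Mathlib
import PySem

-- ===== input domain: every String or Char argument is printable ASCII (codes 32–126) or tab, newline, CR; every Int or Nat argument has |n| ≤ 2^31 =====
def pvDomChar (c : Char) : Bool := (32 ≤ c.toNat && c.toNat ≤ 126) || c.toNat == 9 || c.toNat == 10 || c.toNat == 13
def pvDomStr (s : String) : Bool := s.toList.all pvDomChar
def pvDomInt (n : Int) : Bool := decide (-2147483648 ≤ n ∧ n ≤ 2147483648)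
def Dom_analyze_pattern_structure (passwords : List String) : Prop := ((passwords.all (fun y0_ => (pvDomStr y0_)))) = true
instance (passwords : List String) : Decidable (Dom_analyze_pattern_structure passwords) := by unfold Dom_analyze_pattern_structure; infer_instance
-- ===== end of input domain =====

-- B replaces A's current-type/count state machine in extract_structure_pattern by a
-- two-pointer run splitter (objective: alternative decomposition, same cost).

-- ===== PORT A =====
-- shared helper get_char_type (identical in Source A and Source B)
def get_char_type (c : Char) : Char :=
  if PySem.Chars.islower c then 'L'
  else if PySem.Chars.isupper c then 'U'
  else if PySem.Chars.isdigit c then 'D'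
  else if !(PySem.Chars.isalnum c) then 'S'
  else 'O'

-- A's extract_structure_pattern: state machine (pattern_parts, current_char_type, count)
def extract_structure_pattern (password : String) : Option String :=
  let p := PySem.Chars.strip password.toList
  match p with
  | [] => none
  | c :: rest =>
    let st := rest.foldl
      (fun (s : List (List Char) × Char × Int) ch =>
        let t := get_char_type ch
        if t == s.2.1 then (s.1, s.2.1, s.2.2 + 1)
        else (s.1 ++ [s.2.1 :: PySem.Int.toChars s.2.2], t, 1))
      ([], get_char_type c, 1)
    some (String.ofList (PySem.Chars.join [] (st.1 ++ [st.2.1 :: PySem.Int.toChars st.2.2])))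

def analyze_pattern_structure (passwords : List String) : (List (String × Int)) × (List (String × List (String × Int))) :=
  let st := passwords.foldl
    (fun (s : PySem.Dict String Int × PySem.Dict String (PySem.Dict String Int)) (pwd : String) =>
      let ps := PySem.Chars.strip pwd.toList
      if ps = [] then s
      else
        match extract_structure_pattern (String.ofList ps) with
        | none => s
        | some pat =>
          if pat.toList = [] then s
          else (s.1.modify pat 0 (· + 1),
                s.2.modify pat PySem.Dict.empty (fun inner => inner.modify (String.ofList ps) 0 (· + 1))))
    (PySem.Dict.empty, PySem.Dict.empty)
  (st.1.items, st.2.items.map (fun kv => (kv.1, kv.2.items)))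

-- ===== PORT B =====
-- Source B's _runs: split the (already stripped) password into maximal runs of one char type
def alt_runs : List Char → List (Char × Int)
  | [] => []
  | c :: rest =>
    (get_char_type c,
      (((c :: rest).takeWhile (fun ch => get_char_type ch == get_char_type c)).length : Int))
      :: alt_runs ((c :: rest).dropWhile (fun ch => get_char_type ch == get_char_type c))
termination_by cs => cs.length
decreasing_by
  rw [List.dropWhile_cons_of_pos (by simp)]
  exact Nat.lt_succ_of_le (List.length_dropWhile_le _ _)

def alt_pattern (cs : List Char) : List Char :=
  PySem.Chars.join [] ((alt_runs cs).map (fun tc => tc.1 :: PySem.Int.toChars tc.2))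

def analyze_pattern_structure_alt (passwords : List String) : (List (String × Int)) × (List (String × List (String × Int))) :=
  let st := passwords.foldl
    (fun (s : PySem.Dict String Int × PySem.Dict String (PySem.Dict String Int)) (pwd : String) =>
      let ps := PySem.Chars.strip pwd.toList
      if ps = [] then s
      else
        let pat := String.ofList (alt_pattern ps)
        (s.1.modify pat 0 (· + 1),
         s.2.modify pat PySem.Dict.empty (fun inner => inner.modify (String.ofList ps) 0 (· + 1))))
    (PySem.Dict.empty, PySem.Dict.empty)
  (st.1.items, st.2.items.map (fun kv => (kv.1, kv.2.items)))

-- ===== PRECONDITION & SPEC =====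
def Spec_analyze_pattern_structure (passwords : List String) (out : (List (String × Int)) × (List (String × List (String × Int)))) : Prop := out = analyze_pattern_structure_alt passwords
instance (passwords : List String) (out : (List (String × Int)) × (List (String × List (String × Int)))) : Decidable (Spec_analyze_pattern_structure passwords out) := by unfold Spec_analyze_pattern_structure; infer_instance

-- ===== CLAIM (what is proved, stated in full; the proofs are below) =====
def Claim_equal_analyze_pattern_structure : Prop := ∀ (passwords : List String), Dom_analyze_pattern_structure passwords → Spec_analyze_pattern_structure passwords (analyze_pattern_structure passwords)

-- ===== LEMMAS AND PROOFS =====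

-- unfolding equation for alt_runs (well-founded recursion)
theorem alt_runs_cons (c : Char) (rest : List Char) :
    alt_runs (c :: rest) =
      (get_char_type c,
        (((c :: rest).takeWhile (fun ch => get_char_type ch == get_char_type c)).length : Int))
        :: alt_runs ((c :: rest).dropWhile (fun ch => get_char_type ch == get_char_type c)) := by
  rw [alt_runs]

-- A's loop body, named (proof-only helper)
def stepA (s : List (List Char) × Char × Int) (ch : Char) : List (List Char) × Char × Int :=
  let t := get_char_type ch
  if t == s.2.1 then (s.1, s.2.1, s.2.2 + 1)
  else (s.1 ++ [s.2.1 :: PySem.Int.toChars s.2.2], t, 1)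

-- A's loop result, written as a recursion (proof-only helper)
def patParts (t : Char) (cnt : Int) : List Char → List (List Char)
  | [] => [t :: PySem.Int.toChars cnt]
  | c :: cs =>
    if get_char_type c == t then patParts t (cnt + 1) cs
    else (t :: PySem.Int.toChars cnt) :: patParts (get_char_type c) 1 cs

theorem foldA_eq_patParts (rest : List Char) (parts : List (List Char)) (t : Char) (cnt : Int) :
    (rest.foldl stepA (parts, t, cnt)).1
      ++ [(rest.foldl stepA (parts, t, cnt)).2.1
            :: PySem.Int.toChars (rest.foldl stepA (parts, t, cnt)).2.2]
    = parts ++ patParts t cnt rest := by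
  induction rest generalizing parts t cnt with
  | nil => simp [patParts]
  | cons c cs ih =>
    rw [List.foldl_cons]
    by_cases h : get_char_type c == t
    · have hs : stepA (parts, t, cnt) c = (parts, t, cnt + 1) := by simp [stepA, h]
      rw [hs, ih, patParts, if_pos h]
    · have hs : stepA (parts, t, cnt) c
          = (parts ++ [t :: PySem.Int.toChars cnt], get_char_type c, 1) := by
        simp only [stepA]
        rw [if_neg (by simpa using h)]
      rw [hs, ih, patParts, if_neg (by simpa using h), List.append_assoc, List.singleton_append]

theorem patParts_eq_runs (rest : List Char) (t : Char) (cnt : Int) :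
    patParts t cnt rest =
      ((t, cnt + ((rest.takeWhile (fun ch => get_char_type ch == t)).length : Int))
        :: alt_runs (rest.dropWhile (fun ch => get_char_type ch == t))).map
        (fun tc => tc.1 :: PySem.Int.toChars tc.2) := by
  induction rest generalizing t cnt with
  | nil => simp [patParts, alt_runs]
  | cons c cs ih =>
    by_cases h : get_char_type c == t
    · have hc : get_char_type c = t := by simpa using h
      rw [patParts, if_pos h, ih]
      simp only [List.takeWhile_cons, List.dropWhile_cons, h, if_true, List.length_cons,
        List.map_cons]
      congr 3
      push_cast; ring
    · have hc : (get_char_type c == t) = false := by simpa using h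
      rw [patParts, if_neg (by simpa using h), ih]
      simp only [List.takeWhile_cons, List.dropWhile_cons, hc, Bool.false_eq_true, if_false,
        List.length_nil, List.map_cons]
      rw [alt_runs_cons]
      simp [Int.add_comm]

theorem extract_eq_alt (ps : List Char) (hs : PySem.Chars.strip ps = ps) (hne : ps ≠ []) :
    extract_structure_pattern (String.ofList ps) = some (String.ofList (alt_pattern ps)) := by
  obtain ⟨c, rest, rfl⟩ := List.exists_cons_of_ne_nil hne
  have hfold := foldA_eq_patParts rest [] (get_char_type c) 1
  simp only [extract_structure_pattern, String.toList_ofList, hs]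
  rw [show (fun (s : List (List Char) × Char × Int) ch =>
        let t := get_char_type ch
        if t == s.2.1 then (s.1, s.2.1, s.2.2 + 1)
        else (s.1 ++ [s.2.1 :: PySem.Int.toChars s.2.2], t, 1)) = stepA from rfl]
  rw [hfold, patParts_eq_runs]
  simp only [List.nil_append, alt_pattern]
  rw [alt_runs_cons]
  simp only [List.takeWhile_cons, List.dropWhile_cons, beq_self_eq_true, if_true, List.map_cons,
    List.length_cons]
  simp [Int.add_comm]

theorem dropWhile_eq_self_of_prefix {α : Type} (p : α → Bool) {y z : List α}
    (hy : List.dropWhile p y = y) (hz : z <+: y) :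
    List.dropWhile p z = z := by
  cases z with
  | nil => rfl
  | cons a z' =>
    obtain ⟨w, rfl⟩ := hz
    rw [List.cons_append] at hy
    have hpa : p a = false := by
      by_contra hpa
      have hpa' : p a = true := by simpa using hpa
      rw [List.dropWhile_cons_of_pos hpa'] at hy
      have hle := List.length_dropWhile_le p (z' ++ w)
      rw [hy] at hle
      simp at hle
    exact List.dropWhile_cons_of_neg (by simp [hpa])

theorem rstrip_prefix (l : List Char) : PySem.Chars.rstrip l <+: l := by
  have h := List.dropWhile_suffix (l := l.reverse) PySem.Chars.isspace
  have h2 := List.reverse_prefix.mpr h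
  simpa [PySem.Chars.rstrip] using h2

theorem rstrip_idem (l : List Char) :
    PySem.Chars.rstrip (PySem.Chars.rstrip l) = PySem.Chars.rstrip l := by
  simp [PySem.Chars.rstrip, List.dropWhile_idempotent]

theorem strip_idem (l : List Char) :
    PySem.Chars.strip (PySem.Chars.strip l) = PySem.Chars.strip l := by
  have hx : List.dropWhile PySem.Chars.isspace (PySem.Chars.lstrip l) = PySem.Chars.lstrip l := by
    simp [PySem.Chars.lstrip, List.dropWhile_idempotent]
  have hls : PySem.Chars.lstrip (PySem.Chars.strip l) = PySem.Chars.strip l := by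
    have hpre : PySem.Chars.strip l <+: PySem.Chars.lstrip l := by
      simpa [PySem.Chars.strip] using rstrip_prefix (PySem.Chars.lstrip l)
    simpa [PySem.Chars.lstrip] using dropWhile_eq_self_of_prefix _ hx hpre
  calc PySem.Chars.strip (PySem.Chars.strip l)
      = PySem.Chars.rstrip (PySem.Chars.lstrip (PySem.Chars.strip l)) := rfl
    _ = PySem.Chars.rstrip (PySem.Chars.strip l) := by rw [hls]
    _ = PySem.Chars.strip l := by
        simpa [PySem.Chars.strip] using rstrip_idem (PySem.Chars.lstrip l)

theorem join_nil_cons (x : List Char) (xs : List (List Char)) :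
    PySem.Chars.join [] (x :: xs) = x ++ PySem.Chars.join [] xs := by
  simp only [PySem.Chars.join, List.intercalate]
  cases xs with
  | nil => simp
  | cons y ys => simp [List.intersperse]

theorem alt_pattern_ne_nil (ps : List Char) (hne : ps ≠ []) : alt_pattern ps ≠ [] := by
  obtain ⟨c, rest, rfl⟩ := List.exists_cons_of_ne_nil hne
  rw [alt_pattern, alt_runs_cons, List.map_cons, join_nil_cons]
  simp

-- ===== VERDICT (by name: the statement is the Claim_ definition above) =====
theorem analyze_pattern_structure_spec : Claim_equal_analyze_pattern_structure := by
  intro passwords _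
  unfold Spec_analyze_pattern_structure analyze_pattern_structure analyze_pattern_structure_alt
  have hfg : (fun (s : PySem.Dict String Int × PySem.Dict String (PySem.Dict String Int)) (pwd : String) =>
      let ps := PySem.Chars.strip pwd.toList
      if ps = [] then s
      else
        match extract_structure_pattern (String.ofList ps) with
        | none => s
        | some pat =>
          if pat.toList = [] then s
          else (s.1.modify pat 0 (· + 1),
                s.2.modify pat PySem.Dict.empty (fun inner => inner.modify (String.ofList ps) 0 (· + 1))))
    = (fun (s : PySem.Dict String Int × PySem.Dict String (PySem.Dict String Int)) (pwd : String) =>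
      let ps := PySem.Chars.strip pwd.toList
      if ps = [] then s
      else
        let pat := String.ofList (alt_pattern ps)
        (s.1.modify pat 0 (· + 1),
         s.2.modify pat PySem.Dict.empty (fun inner => inner.modify (String.ofList ps) 0 (· + 1)))) := by
    funext s pwd
    by_cases hps : PySem.Chars.strip pwd.toList = []
    · simp [hps]
    · dsimp only
      rw [extract_eq_alt _ (strip_idem _) hps]
      have h2 := alt_pattern_ne_nil _ hps
      simp [hps, h2]
  rw [hfg]
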